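-- pv_equiv track=rewrite | github.com/pypi-data/pypi-mirror-385 | packages/mobipick-labs-docker-gui/mobipick_labs_docker_gui-0.1.0-py3-none-any.whl/mobipick_gui/main_window.py | _collapse_carriage_returns
-- ===== SOURCE A (Python) =====
-- def _collapse_carriage_returns(text: str) -> str:
--     if '\r' not in text:
--         return text
--     text = text.replace('\r\n', '\n')
--     if '\r' not in text:
--         return text
--     out_chars: list[str] = []
--     for ch in text:
--         if ch == '\r':
--             while out_chars and out_chars[-1] != '\n':
--                 out_chars.pop()
--         else:
--             out_chars.append(ch)
--     return ''.join(out_chars)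
-- ===== SOURCE B (Python) =====
-- def _collapse_carriage_returns(text: str) -> str:
--     if '\r' not in text:
--         return text
--     text = text.replace('\r\n', '\n')
--     lines: list[list[str]] = []
--     cur: list[str] = []
--     for ch in text:
--         if ch == '\n':
--             lines.append(cur)
--             cur = []
--         elif ch == '\r':
--             cur = []
--         else:
--             cur.append(ch)
--     lines.append(cur)
--     return '\n'.join(''.join(l) for l in lines)
-- ===== Notes on version B (the rewrite author's own statement) =====
-- stated objective: simpler
-- what changed: Replaces the flat char stack with an inner while loop that pops backwards to the last newline on each carriage return by a single line-buffer pass keeping finished lines plus the current line, which is simply reset to empty on a carriage return and joined with newlines at the end; the second containment re-check also disappears.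
import Mathlib
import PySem

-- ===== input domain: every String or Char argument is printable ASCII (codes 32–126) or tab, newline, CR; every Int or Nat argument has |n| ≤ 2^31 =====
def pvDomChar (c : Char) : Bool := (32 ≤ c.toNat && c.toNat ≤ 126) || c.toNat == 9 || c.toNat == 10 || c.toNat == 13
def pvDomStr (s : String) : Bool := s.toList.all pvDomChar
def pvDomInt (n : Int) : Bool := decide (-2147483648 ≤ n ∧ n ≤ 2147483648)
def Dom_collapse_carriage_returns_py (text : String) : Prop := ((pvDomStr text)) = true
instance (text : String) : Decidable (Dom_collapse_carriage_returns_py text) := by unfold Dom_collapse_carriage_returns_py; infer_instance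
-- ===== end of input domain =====

-- B replaces A's char stack with backward popping by a line-buffer pass (finished lines + current line,
-- cleared on '\r') joined with '\n' at the end — simpler, same O(n) cost.

-- ===== PORT A =====
-- inner 'while out_chars and out_chars[-1] != '\n': out_chars.pop()'
def popA (out : List Char) : List Char :=
  match h : out.getLast? with
  | none => out
  | some c => if c ≠ '\n' then popA out.dropLast else out
termination_by out.length
decreasing_by
  have hne : out ≠ [] := by intro e; subst e; simp at h
  have : 0 < out.length := List.length_pos_iff.mpr hne
  simp [List.length_dropLast]; omega

-- body of A's 'for ch in text' loop
def stepA (out : List Char) (ch : Char) : List Char :=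
  if ch = '\r' then popA out else out ++ [ch]

def collapse_carriage_returns_py (text : String) : String :=
  if PySem.Str.isIn "\r" text = false then text
  else
    let text := PySem.Str.replace text "\r\n" "\n"
    if PySem.Str.isIn "\r" text = false then text
    else
      let out_chars := text.toList.foldl stepA []
      String.ofList out_chars

-- ===== PORT B =====
-- body of B's 'for ch in text' loop over the state (lines, cur)
def stepB (s : List (List Char) × List Char) (ch : Char) : List (List Char) × List Char :=
  if ch = '\n' then (s.1 ++ [s.2], [])
  else if ch = '\r' then (s.1, [])
  else (s.1, s.2 ++ [ch])

def collapse_carriage_returns_py_alt (text : String) : String :=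
  if PySem.Str.isIn "\r" text = false then text
  else
    let text := PySem.Str.replace text "\r\n" "\n"
    let s := text.toList.foldl stepB ([], [])
    String.ofList (PySem.Chars.join ['\n'] (s.1 ++ [s.2]))

-- ===== PRECONDITION & SPEC =====
def Spec_collapse_carriage_returns_py (text : String) (out : String) : Prop := out = collapse_carriage_returns_py_alt text
instance (text : String) (out : String) : Decidable (Spec_collapse_carriage_returns_py text out) := by unfold Spec_collapse_carriage_returns_py; infer_instance

-- ===== CLAIM (what is proved, stated in full; the proofs are below) =====
def Claim_equal_collapse_carriage_returns_py : Prop := ∀ (text : String), Dom_collapse_carriage_returns_py text → Spec_collapse_carriage_returns_py text (collapse_carriage_returns_py text)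

-- ===== LEMMAS AND PROOFS =====

-- B's final join, as finished lines flattened with their newlines plus the open line
def pvF (lines : List (List Char)) (cur : List Char) : List Char :=
  (lines.map (· ++ ['\n'])).flatten ++ cur

theorem pvJoinF (lines : List (List Char)) (cur : List Char) :
    PySem.Chars.join ['\n'] (lines ++ [cur]) = pvF lines cur := by
  induction lines with
  | nil => simp [pvF, PySem.Chars.join_singleton]
  | cons a ls ih =>
    cases ls with
    | nil => simp [pvF, PySem.Chars.join_cons_cons, PySem.Chars.join_singleton]
    | cons b bs =>
      have : ((b :: bs) ++ [cur]) = b :: (bs ++ [cur]) := rfl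
      simp only [List.cons_append, PySem.Chars.join_cons_cons] at *
      simp [pvF] at ih ⊢
      simp [ih]

theorem pvPopA_base (X : List Char) (hX : X = [] ∨ ∃ Y, X = Y ++ ['\n']) : popA X = X := by
  rcases hX with h | ⟨Y, h⟩ <;> subst h
  · unfold popA; simp
  · unfold popA
    split
    · rfl
    · rename_i c h
      rw [List.getLast?_concat] at h
      injection h with h
      subst h
      simp

theorem pvPopA_append (cur : List Char) (hcur : ∀ c ∈ cur, c ≠ '\n')
    (X : List Char) (hX : X = [] ∨ ∃ Y, X = Y ++ ['\n']) : popA (X ++ cur) = X := by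
  induction cur using List.reverseRecOn with
  | nil => rw [List.append_nil]; exact pvPopA_base X hX
  | append_singleton cs c ih =>
    have hc : c ≠ '\n' := hcur c (by simp)
    rw [show X ++ (cs ++ [c]) = (X ++ cs) ++ [c] by simp]
    unfold popA
    split
    · rename_i h
      rw [List.getLast?_concat] at h
      cases h
    · rename_i d h
      rw [List.getLast?_concat] at h
      injection h with h
      subst h
      simp only [ne_eq, hc, not_false_iff, if_true, List.dropLast_concat]
      exact ih (fun x hx => hcur x (by simp [hx]))

theorem pvFlatten_shape (lines : List (List Char)) :
    (lines.map (· ++ ['\n'])).flatten = [] ∨ ∃ Y, (lines.map (· ++ ['\n'])).flatten = Y ++ ['\n'] := by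
  induction lines using List.reverseRecOn with
  | nil => left; rfl
  | append_singleton ls a _ =>
    right
    exact ⟨(ls.map (· ++ ['\n'])).flatten ++ a, by simp⟩

theorem pvInv (t : List Char) : ∀ lines cur, (∀ c ∈ cur, c ≠ '\n') →
    t.foldl stepA (pvF lines cur) =
      pvF (t.foldl stepB (lines, cur)).1 (t.foldl stepB (lines, cur)).2 := by
  induction t with
  | nil => intro lines cur _; rfl
  | cons c t ih =>
    intro lines cur hcur
    by_cases hn : c = '\n'
    · subst hn
      have h1 : stepA (pvF lines cur) '\n' = pvF (lines ++ [cur]) [] := by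
        simp [stepA, pvF]
      have h2 : stepB (lines, cur) '\n' = (lines ++ [cur], []) := by simp [stepB]
      simp only [List.foldl_cons, h1, h2]
      exact ih _ _ (by simp)
    · by_cases hr : c = '\r'
      · subst hr
        have h1 : stepA (pvF lines cur) '\r' = pvF lines [] := by
          simp only [stepA, pvF, List.append_nil]
          exact pvPopA_append cur hcur _ (pvFlatten_shape lines)
        have h2 : stepB (lines, cur) '\r' = (lines, []) := by simp [stepB]
        simp only [List.foldl_cons, h1, h2]
        exact ih _ _ (by simp)
      · have h1 : stepA (pvF lines cur) c = pvF lines (cur ++ [c]) := by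
          simp [stepA, hr, pvF]
        have h2 : stepB (lines, cur) c = (lines, cur ++ [c]) := by simp [stepB, hn, hr]
        simp only [List.foldl_cons, h1, h2]
        refine ih _ _ ?_
        intro x hx
        rcases List.mem_append.mp hx with h | h
        · exact hcur x h
        · simp at h; subst h; exact hn

theorem pvNoCR (t : List Char) : ∀ acc, (∀ c ∈ t, c ≠ '\r') → t.foldl stepA acc = acc ++ t := by
  induction t with
  | nil => intro acc _; simp
  | cons c t ih =>
    intro acc h
    have hc : c ≠ '\r' := h c (by simp)
    simp only [List.foldl_cons, stepA, if_neg hc]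
    rw [ih _ (fun x hx => h x (by simp [hx]))]
    simp

theorem pvNotIn (l : List Char) (h : PySem.Chars.isIn ['\r'] l = false) : ∀ c ∈ l, c ≠ '\r' := by
  intro c hc he
  have hni : ¬ (['\r'] <:+: l) := (PySem.Chars.isIn_eq_false_iff _ _).mp h
  exact hni ((List.singleton_infix_iff '\r' l).mpr (he ▸ hc))

-- ===== VERDICT (by name: the statement is the Claim_ definition above) =====
theorem collapse_carriage_returns_py_spec : Claim_equal_collapse_carriage_returns_py := by
  intro text _
  unfold Spec_collapse_carriage_returns_py collapse_carriage_returns_py collapse_carriage_returns_py_alt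
  by_cases h1 : PySem.Chars.isIn ['\r'] text.toList = false
  · simp [h1]
  · simp only [PySem.Str.isIn] at *
    simp [h1]
    set L := PySem.Chars.replace text.toList ['\r', '\n'] ['\n'] with hL
    have hinv := pvInv L [] [] (by simp)
    have hF0 : pvF [] [] = ([] : List Char) := rfl
    have hLt : (PySem.Str.replace text "\r\n" "\n").toList = L := by
      simp [PySem.Str.toList_replace]
      exact hL.symm
    by_cases h2 : PySem.Chars.isIn ['\r'] L = false
    · rw [if_pos h2]
      have hnc := pvNoCR L [] (pvNotIn L h2)
      rw [pvJoinF, ← hinv, hF0, hnc, List.nil_append, ← hLt, String.ofList_toList]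
    · rw [if_neg h2, pvJoinF, ← hinv, hF0]
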